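-- pv_equiv track=rewrite | github.com/DIRACGrid/DIRAC | WorkloadManagementSystem/Agent/JobSchedulingAgent.py | applySiteRequirements
-- ===== SOURCE A (Python) =====
-- def applySiteRequirements( sites, activeSites = None, bannedSites = None ):
--   """ Return site list after applying
--   """
--   siteList = list( sites )
--   if activeSites:
--     for site in sites:
--       if site not in activeSites:
--         siteList.remove( site )
--   if bannedSites:
--     for site in bannedSites:
--       if site in siteList:
--         siteList.remove( site )
--
--   return siteList
-- ===== SOURCE B (Python) =====
-- def applySiteRequirements(sites, activeSites=None, bannedSites=None):
--     """Return site list after applying"""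
--     banned = {}
--     if bannedSites:
--         for s in bannedSites:
--             banned[s] = banned.get(s, 0) + 1
--     active = set(activeSites) if activeSites else None
--     result = []
--     for site in sites:
--         if active is not None and site not in active:
--             continue
--         if banned.get(site, 0) > 0:
--             banned[site] = banned[site] - 1
--         else:
--             result.append(site)
--     return result
-- ===== Notes on version B (the rewrite author's own statement) =====
-- stated objective: faster
-- what changed: Replaces A's copy-then-two-remove-loops (each list.remove and 'in' test a linear scan) by a banned-multiset table and an active hash set built once, then one single left-to-right pass that either consumes a banned credit or appends the site.
import Mathlib
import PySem

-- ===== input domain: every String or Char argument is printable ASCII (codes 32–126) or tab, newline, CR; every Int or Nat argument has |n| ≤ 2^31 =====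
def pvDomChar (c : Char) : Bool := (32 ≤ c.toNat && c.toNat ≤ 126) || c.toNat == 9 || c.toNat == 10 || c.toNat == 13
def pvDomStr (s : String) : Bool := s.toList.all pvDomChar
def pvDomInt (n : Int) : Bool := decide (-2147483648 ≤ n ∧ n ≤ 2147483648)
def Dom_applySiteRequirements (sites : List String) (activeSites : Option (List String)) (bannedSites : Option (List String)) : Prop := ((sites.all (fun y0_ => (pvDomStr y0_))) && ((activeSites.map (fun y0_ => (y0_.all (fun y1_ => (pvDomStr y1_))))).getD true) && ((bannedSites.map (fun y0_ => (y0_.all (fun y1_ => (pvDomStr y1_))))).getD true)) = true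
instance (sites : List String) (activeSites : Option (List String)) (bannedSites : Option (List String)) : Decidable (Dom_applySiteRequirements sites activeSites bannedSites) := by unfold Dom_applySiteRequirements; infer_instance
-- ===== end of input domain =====

-- B builds the banned multiset once and filters in a single pass instead of A's
-- copy-then-repeated-list.remove loops (measured objective: faster; A never mutates its arguments).

-- ===== PORT A =====
def applySiteRequirements (sites : List String) (activeSites : Option (List String)) (bannedSites : Option (List String)) : List String :=
  -- siteList = list(sites)
  let siteList := sites
  -- if activeSites: for site in sites: if site not in activeSites: siteList.remove(site)
  -- (that remove never hits a missing element, so .getD siteList is only a totality guard)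
  let siteList :=
    match activeSites with
    | some act =>
        if !act.isEmpty then
          sites.foldl (fun acc site =>
            if !(act.contains site) then (PySem.List.remove? acc site).getD acc else acc) siteList
        else siteList
    | none => siteList
  -- if bannedSites: for site in bannedSites: if site in siteList: siteList.remove(site)
  match bannedSites with
  | some ban =>
      if !ban.isEmpty then
        ban.foldl (fun acc site =>
          if acc.contains site then (PySem.List.remove? acc site).getD acc else acc) siteList
      else siteList
  | none => siteList

-- ===== PORT B =====
def applySiteRequirements_alt (sites : List String) (activeSites : Option (List String)) (bannedSites : Option (List String)) : List String :=
  -- banned = {}; if bannedSites: for s in bannedSites: banned[s] = banned.get(s, 0) + 1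
  let banned : PySem.Dict String Int :=
    match bannedSites with
    | some ban =>
        if !ban.isEmpty then
          ban.foldl (fun d s => d.insert s (d.getD s 0 + 1)) PySem.Dict.empty
        else PySem.Dict.empty
    | none => PySem.Dict.empty
  -- active = set(activeSites) if activeSites else None
  let active : Option (PySem.Set String) :=
    match activeSites with
    | some act => if !act.isEmpty then some (PySem.Set.ofList act) else none
    | none => none
  -- result = []; for site in sites: … ; return result
  let st := sites.foldl (fun (st : PySem.Dict String Int × List String) site =>
      if (match active with
          | some a => !(a.contains site)
          | none => false) then st                  -- continue
      else if 0 < st.1.getD site 0 then (st.1.insert site (st.1.getD site 0 - 1), st.2)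
      else (st.1, st.2 ++ [site])) (banned, [])
  st.2

-- ===== PRECONDITION & SPEC =====
def Spec_applySiteRequirements (sites : List String) (activeSites : Option (List String)) (bannedSites : Option (List String)) (out : List String) : Prop := out = applySiteRequirements_alt sites activeSites bannedSites
instance (sites : List String) (activeSites : Option (List String)) (bannedSites : Option (List String)) (out : List String) : Decidable (Spec_applySiteRequirements sites activeSites bannedSites out) := by unfold Spec_applySiteRequirements; infer_instance

-- ===== CLAIM (what is proved, stated in full; the proofs are below) =====
def Claim_equal_applySiteRequirements : Prop := ∀ (sites : List String) (activeSites : Option (List String)) (bannedSites : Option (List String)), Dom_applySiteRequirements sites activeSites bannedSites → Spec_applySiteRequirements sites activeSites bannedSites (applySiteRequirements sites activeSites bannedSites)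

-- ===== LEMMAS AND PROOFS =====

-- credit-based multiset removal: the common mathematical form both programs are reduced to
def pvDec (f : String → Int) (x : String) : String → Int := fun s => if s = x then f x - 1 else f s
def pvBump (f : String → Int) (b : String) : String → Int := fun s => if s = b then f b + 1 else f s
def pvRC (f : String → Int) : List String → List String
  | [] => []
  | x :: xs => if 0 < f x then pvRC (pvDec f x) xs else x :: pvRC f xs

theorem pvRC_congr (ys : List String) : ∀ (f g : String → Int), (∀ y, f y = g y) → pvRC f ys = pvRC g ys := by
  induction ys with
  | nil => intro f g h; rfl
  | cons y ys ih =>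
      intro f g h
      simp only [pvRC, h y]
      split
      · exact ih _ _ (fun s => by simp [pvDec, h])
      · exact congrArg _ (ih _ _ h)

theorem pvRC_nonpos (ys : List String) (f : String → Int) (h : ∀ y, f y ≤ 0) : pvRC f ys = ys := by
  induction ys with
  | nil => rfl
  | cons y ys ih =>
      have hy : ¬ (0 < f y) := not_lt.mpr (h y)
      simp only [pvRC, if_neg hy]
      exact congrArg _ ih

theorem pvRC_erase (xs : List String) : ∀ (f : String → Int) (b : String), (∀ s, 0 ≤ f s) →
    pvRC f (xs.erase b) = pvRC (pvBump f b) xs := by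
  induction xs with
  | nil => intro f b _; rfl
  | cons x xs ih =>
      intro f b hf
      by_cases hxb : x = b
      · subst hxb
        rw [List.erase_cons_head]
        have hpos : 0 < pvBump f x x := by simp [pvBump]; have := hf x; omega
        simp only [pvRC, if_pos hpos]
        exact pvRC_congr xs _ _ (fun s => by by_cases h : s = x <;> simp [pvDec, pvBump, h])
      · rw [List.erase_cons_tail (by simp [hxb])]
        have hbx : pvBump f b x = f x := by simp [pvBump, hxb]
        simp only [pvRC, hbx]
        split
        · rw [ih (pvDec f x) b (fun s => by by_cases h : s = x <;> simp [pvDec, h] <;> [skip; exact hf s]; have := hf x; omega)]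
          exact pvRC_congr xs _ _ (fun s => by
            by_cases h1 : s = b <;> by_cases h2 : s = x <;>
              simp_all [pvBump, pvDec])
        · exact congrArg _ (ih f b hf)

-- A's second loop (repeated conditional remove) equals credit removal with the count function
theorem pvA_ban (ban : List String) : ∀ (xs : List String),
    ban.foldl (fun acc site => if acc.contains site then (PySem.List.remove? acc site).getD acc else acc) xs
      = pvRC (fun s => (ban.count s : Int)) xs := by
  induction ban with
  | nil => intro xs; exact (pvRC_nonpos xs _ (fun y => by simp)).symm
  | cons b ban ih =>
      intro xs
      have hstep : (if xs.contains b then (PySem.List.remove? xs b).getD xs else xs) = xs.erase b := by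
        by_cases h : b ∈ xs
        · rw [if_pos (by simpa using h), PySem.List.remove?_eq_some_erase xs b h]; rfl
        · rw [if_neg (by simpa using h), List.erase_of_not_mem h]
      rw [List.foldl_cons, hstep, ih, pvRC_erase xs _ b (fun s => by positivity)]
      refine pvRC_congr xs _ _ (fun s => ?_)
      by_cases h : s = b
      · subst h; simp [pvBump]
      · simp [pvBump, h, List.count_cons]
        exact fun hh => h hh.symm

-- A's first loop equals a filter (invariant: processed prefix already filtered)
theorem pvA_act (act : List String) : ∀ (r p : List String), (∀ x ∈ p, x ∈ act) →
    r.foldl (fun acc site => if !(act.contains site) then (PySem.List.remove? acc site).getD acc else acc) (p ++ r)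
      = p ++ r.filter (fun s => act.contains s) := by
  intro r
  induction r with
  | nil => intro p _; simp
  | cons s r ih =>
      intro p hp
      by_cases hs : s ∈ act
      · have : p ++ s :: r = (p ++ [s]) ++ r := by simp
        rw [List.foldl_cons, if_neg (by simpa using hs), this,
          ih (p ++ [s]) (by intro x hx; rcases List.mem_append.1 hx with h | h; exact hp x h; simpa using (List.mem_singleton.1 h) ▸ hs)]
        simp [hs]
      · have hrem : PySem.List.remove? (p ++ s :: r) s = some (p ++ r) := by
          rw [PySem.List.remove?_eq_some_erase (p ++ s :: r) s (by simp),
            List.erase_append_right _ (fun h => hs (hp s h)), List.erase_cons_head]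
        rw [List.foldl_cons, if_pos (by simpa using hs), hrem]
        simp only [Option.getD_some]
        rw [ih p hp]
        simp [hs]

-- B's dict-building loop counts occurrences
theorem pvB_build (ban : List String) : ∀ (d : PySem.Dict String Int) (s : String),
    (ban.foldl (fun d s => d.insert s (d.getD s 0 + 1)) d).getD s 0 = d.getD s 0 + ban.count s := by
  induction ban with
  | nil => intro d s; simp
  | cons b ban ih =>
      intro d s
      rw [List.foldl_cons, ih]
      by_cases h : s = b
      case pos => subst h; simp; ring
      case neg =>
        simp [PySem.Dict.getD_insert, h, List.count_cons]
        exact fun hh => h hh.symm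

-- B's main pass (without the active guard) is credit removal
theorem pvB_pass (ys : List String) : ∀ (d : PySem.Dict String Int) (res : List String),
    (ys.foldl (fun (st : PySem.Dict String Int × List String) site =>
        if 0 < st.1.getD site 0 then (st.1.insert site (st.1.getD site 0 - 1), st.2)
        else (st.1, st.2 ++ [site])) (d, res)).2
      = res ++ pvRC (fun s => d.getD s 0) ys := by
  induction ys with
  | nil => intro d res; simp [pvRC]
  | cons y ys ih =>
      intro d res
      rw [List.foldl_cons]
      by_cases h : 0 < d.getD y 0
      · simp only [ih, pvRC, if_pos h]
        exact congrArg _ (pvRC_congr ys _ _ (fun s => by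
          by_cases hs : s = y <;> simp [PySem.Dict.getD_insert, pvDec, hs]))
      · simp only [ih, pvRC, if_neg h, List.append_assoc, List.singleton_append]

-- a skipped step commutes with filtering
theorem pvFoldl_skip {α β : Type} (p : β → Bool) (g : α → β → α) (xs : List β) : ∀ (st : α),
    xs.foldl (fun st x => if p x then st else g st x) st = (xs.filter (fun x => !p x)).foldl g st := by
  induction xs with
  | nil => intro st; rfl
  | cons x xs ih =>
      intro st
      by_cases h : p x <;> simp [h, ih]

-- ===== VERDICT (by name: the statement is the Claim_ definition above) =====
-- normal form: filter by the active list, then subtract the banned multiset by credits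
def pvAct (a : Option (List String)) (sites : List String) : List String :=
  match a with
  | some act => if !act.isEmpty then sites.filter (fun s => act.contains s) else sites
  | none => sites

def pvBan (b : Option (List String)) : List String :=
  match b with
  | some bl => if !bl.isEmpty then bl else []
  | none => []

theorem pvEmptyGetD (s : String) : (PySem.Dict.empty : PySem.Dict String Int).getD s 0 = 0 := by
  simp [PySem.Dict.empty, PySem.Dict.getD, PySem.Dict.get?]

theorem pvA_val (sites : List String) (a b : Option (List String)) :
    applySiteRequirements sites a b
      = pvRC (fun s => ((pvBan b).count s : Int)) (pvAct a sites) := by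
  simp only [applySiteRequirements]
  have hact : (match a with
      | some act =>
          if !act.isEmpty then
            sites.foldl (fun acc site =>
              if !(act.contains site) then (PySem.List.remove? acc site).getD acc else acc) sites
          else sites
      | none => sites) = pvAct a sites := by
    cases a with
    | none => rfl
    | some act =>
        unfold pvAct
        dsimp only
        cases hae : act.isEmpty
        · simp only [Bool.not_false, reduceIte]
          simpa using pvA_act act sites [] (by simp)
        · simp
  rw [hact]
  cases b with
  | none => exact (pvRC_nonpos _ _ (fun y => by simp [pvBan])).symm
  | some bl =>
      dsimp only
      cases hbe : bl.isEmpty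
      · simp only [Bool.not_false, reduceIte]
        rw [pvA_ban]
        exact pvRC_congr _ _ _ (fun y => by simp [pvBan, hbe])
      · simp only [Bool.not_true, Bool.false_eq_true, reduceIte]
        exact (pvRC_nonpos _ _ (fun y => by simp [pvBan, hbe])).symm

theorem pvB_val (sites : List String) (a b : Option (List String)) :
    applySiteRequirements_alt sites a b
      = pvRC (fun s => ((pvBan b).count s : Int)) (pvAct a sites) := by
  simp only [applySiteRequirements_alt]
  have hdict : ∀ s : String, ((match b with
      | some ban =>
          if !ban.isEmpty then
            ban.foldl (fun (d : PySem.Dict String Int) s => d.insert s (d.getD s 0 + 1)) PySem.Dict.empty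
          else PySem.Dict.empty
      | none => (PySem.Dict.empty : PySem.Dict String Int))).getD s 0
        = ((pvBan b).count s : Int) := by
    intro s
    cases b with
    | none => simp [pvBan]
    | some bl =>
        dsimp only
        cases hbe : bl.isEmpty
        · simp only [Bool.not_false, reduceIte]
          rw [pvB_build, pvEmptyGetD]
          simp [pvBan, hbe]
        · simp only [Bool.not_true, Bool.false_eq_true, reduceIte]
          simp [pvBan, hbe]
  have hskip : ∀ (st0 : PySem.Dict String Int × List String),
      sites.foldl (fun (st : PySem.Dict String Int × List String) site =>
        if (match (match a with
            | some act => if !act.isEmpty then some (PySem.Set.ofList act) else none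
            | none => none) with
            | some aset => !(aset.contains site)
            | none => false) then st
        else if 0 < st.1.getD site 0 then (st.1.insert site (st.1.getD site 0 - 1), st.2)
        else (st.1, st.2 ++ [site])) st0
      = (pvAct a sites).foldl (fun (st : PySem.Dict String Int × List String) site =>
          if 0 < st.1.getD site 0 then (st.1.insert site (st.1.getD site 0 - 1), st.2)
          else (st.1, st.2 ++ [site])) st0 := by
    intro st0
    cases a with
    | none => simp [pvAct]
    | some act =>
        cases hae : act.isEmpty
        · simp only [hae, Bool.not_false, reduceIte]
          rw [pvFoldl_skip (fun site => !((PySem.Set.ofList act).contains site))]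
          have hf : sites.filter (fun x => !!((PySem.Set.ofList act).contains x))
              = sites.filter (fun s => act.contains s) :=
            List.filter_congr (fun x _ => by
              simp [PySem.Set.mem_ofList])
          rw [hf]
          simp [pvAct, hae]
        · simp [hae, pvAct]
  rw [hskip, pvB_pass]
  simp only [List.nil_append]
  exact pvRC_congr _ _ _ (fun y => hdict y)

theorem applySiteRequirements_spec : Claim_equal_applySiteRequirements := by
  intro sites activeSites bannedSites _
  unfold Spec_applySiteRequirements
  rw [pvA_val, pvB_val]
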